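-- pv_equiv track=rewrite | github.com/MrWHippo/Coursework-Test | example_coursework_pages/AI/test.py | check_straight1
-- ===== SOURCE A (Python) =====
-- def check_straight1(hand, count=1, prev=None):
--     if hand == []:
--         return False
--
--     if count == 5:
--         return True
--
--     if prev is None or hand[0] == prev + 1:
--         return check_straight1(hand[1:], count + 1, hand[0])
--     else:
--         return check_straight1(hand[1:], 1, hand[0])
-- ===== SOURCE B (Python) =====
-- def check_straight1(hand, count=1, prev=None):
--     # Single pass over the hand: keep the running streak count and the
--     # previous card, returning as soon as the streak hits 5.
--     for h in hand:
--         if count == 5: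
--             return True
--         count = count + 1 if prev is None or h == prev + 1 else 1
--         prev = h
--     return False
-- ===== Notes on version B (the rewrite author's own statement) =====
-- stated objective: faster
-- what changed: Replaced the recursion that copies the list with hand[1:] at every step by a single iterative pass over the hand keeping (count, prev) as loop state.
import Mathlib
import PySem

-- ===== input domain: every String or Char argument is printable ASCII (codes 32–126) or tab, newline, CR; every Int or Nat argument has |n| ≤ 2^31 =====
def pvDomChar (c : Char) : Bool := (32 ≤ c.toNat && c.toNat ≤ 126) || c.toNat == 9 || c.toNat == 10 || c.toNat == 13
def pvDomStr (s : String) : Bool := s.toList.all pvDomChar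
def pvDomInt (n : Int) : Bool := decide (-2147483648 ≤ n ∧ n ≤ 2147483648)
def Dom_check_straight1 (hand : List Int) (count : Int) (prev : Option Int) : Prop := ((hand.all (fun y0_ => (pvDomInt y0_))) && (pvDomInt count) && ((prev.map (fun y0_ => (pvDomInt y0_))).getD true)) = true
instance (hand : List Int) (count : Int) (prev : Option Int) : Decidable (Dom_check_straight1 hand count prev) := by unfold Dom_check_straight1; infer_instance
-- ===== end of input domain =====

-- B replaces A's recursion (which copies the list with hand[1:] at every step)
-- by a single iterative pass keeping (count, prev) as loop state; objective: faster.

-- ===== PORT A =====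
-- Literal port of A: recursion with hand[1:] (tail of a nonempty list), branches in order.
def check_straight1 (hand : List Int) (count : Int) (prev : Option Int) : Bool :=
  match hand with
  | [] => false
  | h :: t =>
    if count = 5 then true
    else if (match prev with | none => true | some p => decide (h = p + 1)) then
      check_straight1 t (count + 1) (some h)
    else
      check_straight1 t 1 (some h)

-- ===== PORT B =====
-- B's `for h in hand` loop with early return; the loop state is the pair (count, prev).
def cs1Loop (state : Int × Option Int) : List Int → Bool
  | [] => false
  | h :: rest =>
    if state.1 = 5 then true
    else
      cs1Loop (if state.2.elim true (fun p => h = p + 1) then state.1 + 1 else 1, some h) rest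

def check_straight1_alt (hand : List Int) (count : Int) (prev : Option Int) : Bool :=
  cs1Loop (count, prev) hand

-- ===== PRECONDITION & SPEC =====
def Spec_check_straight1 (hand : List Int) (count : Int) (prev : Option Int) (out : Bool) : Prop := out = check_straight1_alt hand count prev
instance (hand : List Int) (count : Int) (prev : Option Int) (out : Bool) : Decidable (Spec_check_straight1 hand count prev out) := by unfold Spec_check_straight1; infer_instance

-- ===== CLAIM (what is proved, stated in full; the proofs are below) =====
def Claim_equal_check_straight1 : Prop := ∀ (hand : List Int) (count : Int) (prev : Option Int), Dom_check_straight1 hand count prev → Spec_check_straight1 hand count prev (check_straight1 hand count prev)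

-- ===== LEMMAS AND PROOFS =====
theorem cs1_main (hand : List Int) : ∀ (count : Int) (prev : Option Int),
    check_straight1 hand count prev = cs1Loop (count, prev) hand := by
  induction hand with
  | nil => intro count prev; rfl
  | cons h t ih =>
    intro count prev
    simp only [check_straight1, cs1Loop]
    by_cases hc : count = 5
    · simp [hc]
    · rw [if_neg hc, if_neg hc]
      cases prev with
      | none => simpa using ih (count + 1) (some h)
      | some p =>
        by_cases hp : h = p + 1
        · simpa [hp] using ih (count + 1) (some h)
        · simpa [hp] using ih 1 (some h)

-- ===== VERDICT (by name: the statement is the Claim_ definition above) =====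
theorem check_straight1_spec : Claim_equal_check_straight1 := by
  intro hand count prev _
  unfold Spec_check_straight1 check_straight1_alt
  exact cs1_main hand count prev
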